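-- pv_equiv track=rewrite | github.com/asweigart/programmedpatterns | book/visualpatterns.py | pattern56
-- ===== SOURCE A (Python) =====
-- def pattern56(step):
--     size = 1
--     for i in range(2, step + 1):
--         if i % 2 == 0:
--             size += 1
--     row = ('O' * size) + '\n'
--     pattern = row * size
--     return pattern
-- ===== SOURCE B (Python) =====
-- def pattern56(step):
--     size = step // 2 + 1 if step >= 2 else 1
--     line = 'O' * size
--     return '\n'.join([line] * size) + '\n'
-- ===== Notes on version B (the rewrite author's own statement) =====
-- stated objective: simpler
-- what changed: Replaces the O(step) even-counting loop with the closed-form side length (step//2 + 1 for step >= 2, else 1) and builds the square by joining a replicated line list with newline instead of repeating a newline-terminated row string.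
import Mathlib
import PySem

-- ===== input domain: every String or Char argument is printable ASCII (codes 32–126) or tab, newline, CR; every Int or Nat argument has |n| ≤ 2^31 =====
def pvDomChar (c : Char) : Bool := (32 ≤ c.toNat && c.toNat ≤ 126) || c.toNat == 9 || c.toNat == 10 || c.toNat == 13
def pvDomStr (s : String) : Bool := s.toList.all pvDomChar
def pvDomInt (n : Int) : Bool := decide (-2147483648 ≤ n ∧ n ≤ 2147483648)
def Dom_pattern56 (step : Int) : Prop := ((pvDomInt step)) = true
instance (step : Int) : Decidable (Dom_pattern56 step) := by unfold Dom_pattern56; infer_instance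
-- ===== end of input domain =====

-- B replaces A's even-counting loop with the closed-form side length (step//2 + 1 for step ≥ 2,
-- else 1) and builds the square by '\n'-joining a replicated list of lines (simpler).
-- ===== PORT A =====
def pattern56 (step : Int) : String :=
  let size : Int := (PySem.List.pyRange 2 (step + 1) 1).foldl
    (fun s i => if PySem.Int.mod i 2 = 0 then s + 1 else s) 1
  let row : List Char := PySem.List.pyRepeat ['O'] size ++ ['\n']
  String.ofList (PySem.List.pyRepeat row size)

-- ===== PORT B =====
def pattern56_alt (step : Int) : String :=
  let size : Nat := if 2 ≤ step then (PySem.Int.floordiv step 2 + 1).toNat else 1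
  let line : List Char := List.replicate size 'O'
  String.ofList (PySem.Chars.join ['\n'] (List.replicate size line) ++ ['\n'])

-- ===== PRECONDITION & SPEC =====
def Spec_pattern56 (step : Int) (out : String) : Prop := out = pattern56_alt step
instance (step : Int) (out : String) : Decidable (Spec_pattern56 step out) := by unfold Spec_pattern56; infer_instance

-- ===== CLAIM (what is proved, stated in full; the proofs are below) =====
def Claim_equal_pattern56 : Prop := ∀ (step : Int), Dom_pattern56 step → Spec_pattern56 step (pattern56 step)

-- ===== LEMMAS AND PROOFS =====
lemma pv_fd (a : Int) : PySem.Int.floordiv a 2 = a / 2 := by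
  simp [PySem.Int.floordiv, Int.fdiv_eq_ediv]

lemma pv_md (a : Int) : PySem.Int.mod a 2 = a % 2 := by
  simp [PySem.Int.mod, Int.fmod_eq_emod]

-- A's loop over [2, step] computes the closed form 1 + max(step // 2, 0), for step = 2 + k
lemma pv_count_ge (k : Nat) :
    (PySem.List.pyRange 2 ((2 : Int) + k + 1) 1).foldl
      (fun s i => if PySem.Int.mod i 2 = 0 then s + 1 else s) (1 : Int)
    = 1 + max (PySem.Int.floordiv ((2 : Int) + k) 2) 0 := by
  induction k with
  | zero => decide
  | succ k ih =>
    have hb : ((2 : Int) + (k + 1 : Nat) + 1) = ((2 + (k : Int) + 1) + 1) := by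
      push_cast; ring
    rw [hb, PySem.List.pyRange_one_succ_right (by omega), List.foldl_append]
    simp only [List.foldl]
    rw [ih, pv_md, pv_fd, pv_fd]
    split_ifs with h <;> omega

lemma pv_size_eq (step : Int) :
    (PySem.List.pyRange 2 (step + 1) 1).foldl
      (fun s i => if PySem.Int.mod i 2 = 0 then s + 1 else s) (1 : Int)
    = 1 + max (PySem.Int.floordiv step 2) 0 := by
  by_cases h : step ≤ 1
  · rw [PySem.List.pyRange_one_eq_nil (by omega)]
    rw [List.foldl_nil, pv_fd]
    omega
  · obtain ⟨k, hk⟩ := Int.eq_ofNat_of_zero_le (show (0:Int) ≤ step - 2 by omega)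
    have hs : step = 2 + (k : Int) := by omega
    rw [hs]
    exact pv_count_ge k

-- joining n+1 copies of l with sep, then appending sep, is n+1 copies of (l ++ sep)
lemma pv_join_repl (sep l : List Char) (n : Nat) :
    PySem.Chars.join sep (List.replicate (n + 1) l) ++ sep
      = (List.replicate (n + 1) (l ++ sep)).flatten := by
  induction n with
  | zero => simp [PySem.Chars.join_singleton]
  | succ n ih =>
    rw [List.replicate_succ, List.replicate_succ (n := n), PySem.Chars.join_cons_cons,
        ← List.replicate_succ]
    simp only [List.append_assoc]
    rw [ih]
    simp [List.replicate_succ]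

-- ===== VERDICT (by name: the statement is the Claim_ definition above) =====
theorem pattern56_spec : Claim_equal_pattern56 := by
  intro step _
  unfold Spec_pattern56 pattern56 pattern56_alt
  rw [pv_size_eq]
  simp only [PySem.List.pyRepeat_singleton]
  set sI : Int := 1 + max (PySem.Int.floordiv step 2) 0 with hsI
  set sN : Nat := if 2 ≤ step then (PySem.Int.floordiv step 2 + 1).toNat else 1 with hsN
  have hfd : PySem.Int.floordiv step 2 = step / 2 := pv_fd step
  have h1 : sI.toNat = sN := by
    rw [hsI, hsN, hfd]
    by_cases h : 2 ≤ step
    · rw [if_pos h]; omega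
    · rw [if_neg h]
      have : step / 2 ≤ 0 := by
        by_cases h0 : 0 ≤ step
        · interval_cases step <;> decide
        · omega
      omega
  have h2 : 1 ≤ sN := by
    rw [hsN]; by_cases h : 2 ≤ step
    · rw [if_pos h, hfd]; omega
    · rw [if_neg h]
  obtain ⟨m, hm⟩ : ∃ m, sN = m + 1 := ⟨sN - 1, by omega⟩
  simp only [PySem.List.pyRepeat]
  rw [h1, hm, ← pv_join_repl]
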